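-- pv_equiv track=rewrite | github.com/Enjef/Algo | 2300 - 2399/2383 - Minimum Hours of Training to Win a Competition/2383 - Minimum Hours of Training to Win a Competition.py | minNumberOfHours_1st
-- ===== SOURCE A (Python) =====
-- from typing import List
--
-- def minNumberOfHours_1st(initialEnergy: int, initialExperience: int, energy: List[int], experience: List[int]) -> int:
--     curr_eng, curr_exp, ans = initialEnergy, initialExperience, 0
--     for x, y in zip(energy, experience):
--         if curr_eng <= x:
--             ans += x + 1 - curr_eng
--             curr_eng = x + 1
--         if curr_exp <= y:
--             ans += y + 1 - curr_exp
--             curr_exp = y + 1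
--         curr_eng -= x
--         curr_exp += y
--     return ans
-- ===== SOURCE B (Python) =====
-- from typing import List
--
-- def minNumberOfHours_1st(initialEnergy: int, initialExperience: int, energy: List[int], experience: List[int]) -> int:
--     # Branch-free reformulation: the total top-up equals how far the running
--     # "requirement peaks" rise above the initial values.
--     # Energy peak after step j is S_j + 1 (S = prefix sum of energy);
--     # experience peak is y_j + 1 - T_{j-1} (T = prefix sum of experience).
--     s = t = 0
--     peak_eng = initialEnergy
--     peak_exp = initialExperience
--     for x, y in zip(energy, experience):
--         s += x
--         peak_eng = max(peak_eng, s + 1)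
--         peak_exp = max(peak_exp, y + 1 - t)
--         t += y
--     return (peak_eng - initialEnergy) + (peak_exp - initialExperience)
-- ===== Notes on version B (the rewrite author's own statement) =====
-- stated objective: alternative
-- what changed: Replaces A's stateful simulation (current energy/experience with conditional top-ups) by a branch-free prefix-sum + running-max scan: total cost equals how far the requirement peaks (S_j+1 for energy, y_j+1-T_{j-1} for experience) rise above the initial values.
import Mathlib
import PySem

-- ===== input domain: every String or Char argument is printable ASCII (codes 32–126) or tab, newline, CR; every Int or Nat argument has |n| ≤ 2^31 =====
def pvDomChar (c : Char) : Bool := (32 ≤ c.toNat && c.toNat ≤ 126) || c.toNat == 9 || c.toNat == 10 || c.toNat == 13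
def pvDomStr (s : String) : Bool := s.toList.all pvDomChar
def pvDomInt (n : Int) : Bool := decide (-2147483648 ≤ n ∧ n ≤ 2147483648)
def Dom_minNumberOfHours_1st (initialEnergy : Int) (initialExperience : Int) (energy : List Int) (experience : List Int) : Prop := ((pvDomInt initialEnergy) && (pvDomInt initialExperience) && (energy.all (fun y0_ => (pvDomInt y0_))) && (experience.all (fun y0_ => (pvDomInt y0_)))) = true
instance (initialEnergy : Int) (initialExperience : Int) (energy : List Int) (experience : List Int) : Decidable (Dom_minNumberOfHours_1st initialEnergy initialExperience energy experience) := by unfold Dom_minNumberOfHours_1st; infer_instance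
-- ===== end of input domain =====

-- ===== PORT A =====
-- A: stateful simulation of the competition with conditional top-ups.
def pvLoopA : List (Int × Int) → Int → Int → Int → Int
  | [], _, _, ans => ans
  | (x, y) :: rest, currEng, currExp, ans =>
    let (ans1, eng1) := if currEng ≤ x then (ans + (x + 1 - currEng), x + 1) else (ans, currEng)
    let (ans2, exp1) := if currExp ≤ y then (ans1 + (y + 1 - currExp), y + 1) else (ans1, currExp)
    pvLoopA rest (eng1 - x) (exp1 + y) ans2

def minNumberOfHours_1st (initialEnergy : Int) (initialExperience : Int) (energy : List Int) (experience : List Int) : Int :=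
  pvLoopA (energy.zip experience) initialEnergy initialExperience 0

-- ===== PORT B =====
-- B: branch-free prefix-sum + running-max scan (no simulated current state, no top-up branches).
def pvLoopB : List (Int × Int) → Int → Int → Int → Int → Int × Int
  | [], _, _, peakEng, peakExp => (peakEng, peakExp)
  | (x, y) :: rest, s, t, peakEng, peakExp =>
    let s' := s + x
    pvLoopB rest s' (t + y) (max peakEng (s' + 1)) (max peakExp (y + 1 - t))

def minNumberOfHours_1st_alt (initialEnergy : Int) (initialExperience : Int) (energy : List Int) (experience : List Int) : Int :=
  let p := pvLoopB (energy.zip experience) 0 0 initialEnergy initialExperience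
  (p.1 - initialEnergy) + (p.2 - initialExperience)

-- ===== PRECONDITION & SPEC =====
def Spec_minNumberOfHours_1st (initialEnergy : Int) (initialExperience : Int) (energy : List Int) (experience : List Int) (out : Int) : Prop := out = minNumberOfHours_1st_alt initialEnergy initialExperience energy experience
instance (initialEnergy : Int) (initialExperience : Int) (energy : List Int) (experience : List Int) (out : Int) : Decidable (Spec_minNumberOfHours_1st initialEnergy initialExperience energy experience out) := by unfold Spec_minNumberOfHours_1st; infer_instance

-- ===== CLAIM (what is proved, stated in full; the proofs are below) =====
def Claim_equal_minNumberOfHours_1st : Prop := ∀ (initialEnergy : Int) (initialExperience : Int) (energy : List Int) (experience : List Int), Dom_minNumberOfHours_1st initialEnergy initialExperience energy experience → Spec_minNumberOfHours_1st initialEnergy initialExperience energy experience (minNumberOfHours_1st initialEnergy initialExperience energy experience)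

-- ===== LEMMAS AND PROOFS =====
-- Invariant: A's state is recoverable from B's: currEng = peakEng - s, currExp = peakExp + t,
-- and each step's payments equal the increments of the two running maxima.
theorem pvLoop_invariant (l : List (Int × Int)) : ∀ (s t peakEng peakExp a : Int),
    pvLoopA l (peakEng - s) (peakExp + t) a =
      a + ((pvLoopB l s t peakEng peakExp).1 - peakEng) + ((pvLoopB l s t peakEng peakExp).2 - peakExp) := by
  induction l with
  | nil => intro s t pE pX a; simp [pvLoopA, pvLoopB]
  | cons hd rest ih =>
    intro s t pE pX a
    obtain ⟨x, y⟩ := hd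
    simp only [pvLoopA, pvLoopB]
    split_ifs with h1 h2 h2 <;>
      simp only [] <;>
      [ (have e1 : (x : Int) + 1 - x = max pE (s + x + 1) - (s + x) := by omega
         have e2 : (y : Int) + 1 + y = max pX (y + 1 - t) + (t + y) := by omega
         rw [e1, e2, ih]);
        (have e1 : (x : Int) + 1 - x = max pE (s + x + 1) - (s + x) := by omega
         have e2 : pX + t + y = max pX (y + 1 - t) + (t + y) := by omega
         rw [e1, e2, ih]);
        (have e1 : pE - s - x = max pE (s + x + 1) - (s + x) := by omega
         have e2 : (y : Int) + 1 + y = max pX (y + 1 - t) + (t + y) := by omega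
         rw [e1, e2, ih]);
        (have e1 : pE - s - x = max pE (s + x + 1) - (s + x) := by omega
         have e2 : pX + t + y = max pX (y + 1 - t) + (t + y) := by omega
         rw [e1, e2, ih]) ] <;>
      omega

-- ===== VERDICT (by name: the statement is the Claim_ definition above) =====
theorem minNumberOfHours_1st_spec : Claim_equal_minNumberOfHours_1st := by
  intro iE iX energy experience _
  unfold Spec_minNumberOfHours_1st minNumberOfHours_1st minNumberOfHours_1st_alt
  have h := pvLoop_invariant (energy.zip experience) 0 0 iE iX 0
  simp only [sub_zero, add_zero] at h
  rw [h]; ring
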